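-- pv_equiv track=rewrite | github.com/AlekseiAQ/codewars-py | solutions/kyu_6/get_your_steppin_on_son.py | word_step
-- ===== SOURCE A (Python) =====
-- def word_step(s):
--     i, j = 0, 0
--     flag = True
--     matrix = {}
--     index = 1
--     matrix[(i, j)] = s[0]
--     while index < len(s):
--         if s[index] == " ":
--             flag = not flag
--             index += 2
--             continue
--         if flag:
--             j += 1
--         else:
--             i += 1
--         matrix[(i, j)] = s[index]
--         index += 1
--
--     result = []
--     for ii in range(i+1):
--         row = []
--         for jj in range(j+1):
--             row.append(matrix.get((ii, jj), " "))
--         result.append(row)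
--     return result
-- ===== SOURCE B (Python) =====
-- def word_step(s):
--     # Tokenize: after each space, the space AND the following character are consumed
--     # (the shared corner), ending the current segment.
--     segs = []
--     cur = [s[0]]
--     k = 1
--     while k < len(s):
--         if s[k] == " ":
--             segs.append(cur)
--             cur = []
--             k += 2
--         else:
--             cur.append(s[k])
--             k += 1
--     segs.append(cur)
--
--     # Place segments, alternating direction: first right, then down, right, ...
--     pos = {(0, 0): segs[0][0]}
--     i = j = 0
--     for ch in segs[0][1:]:
--         j += 1
--         pos[(i, j)] = ch
--     horiz = True
--     for seg in segs[1:]: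
--         horiz = not horiz
--         for ch in seg:
--             if horiz:
--                 j += 1
--             else:
--                 i += 1
--             pos[(i, j)] = ch
--
--     return [[pos.get((r, c), " ") for c in range(j + 1)] for r in range(i + 1)]
-- ===== Notes on version B (the rewrite author's own statement) =====
-- stated objective: alternative
-- what changed: Replaces A's per-character cursor/flag scan that writes each char into a dict one step at a time by a two-phase decomposition: first tokenize the string into word segments (a space ends a segment and consumes the following shared-corner char), then place whole segments alternating right/down and render the grid.
-- outside the precondition, e.g. on word_step(''): A raises IndexError, B raises IndexError
import Mathlib
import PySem

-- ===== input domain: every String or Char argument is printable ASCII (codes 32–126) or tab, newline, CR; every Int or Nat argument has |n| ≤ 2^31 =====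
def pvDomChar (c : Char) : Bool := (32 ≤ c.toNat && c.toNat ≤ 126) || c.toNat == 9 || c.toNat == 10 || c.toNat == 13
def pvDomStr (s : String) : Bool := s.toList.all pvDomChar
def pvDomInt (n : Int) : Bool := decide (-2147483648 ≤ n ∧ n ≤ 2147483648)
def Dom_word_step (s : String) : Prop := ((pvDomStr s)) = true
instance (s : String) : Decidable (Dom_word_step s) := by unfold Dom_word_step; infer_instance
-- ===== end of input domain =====

-- B replaces A's per-character flag scan by a two-phase decomposition (tokenize into
-- word segments, then place whole segments alternating right/down); same return value.

-- ===== PORT A =====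
-- A's while-loop: state (i, j, flag, matrix), 'index += 2' on a space = drop the space
-- and the following char (rest.tail); otherwise step the cursor and store the char.
def wordStepLoop (rest : List Char) (i j : Nat) (flag : Bool)
    (m : PySem.Dict (Nat × Nat) String) : Nat × Nat × PySem.Dict (Nat × Nat) String :=
  match rest with
  | [] => (i, j, m)
  | c :: rs =>
    if c = ' ' then
      wordStepLoop rs.tail i j (!flag) m
    else
      let i' := if flag then i else i + 1
      let j' := if flag then j + 1 else j
      wordStepLoop rs i' j' flag (m.insert (i', j') c.toString)
termination_by rest.length
decreasing_by all_goals simp [List.length_tail]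

def word_step (s : String) : List (List String) :=
  match s.toList with
  | [] => []   -- unreachable under Pre_: Python raises IndexError on the empty string
  | c :: rest =>
    let st := wordStepLoop rest 0 0 true ((PySem.Dict.empty).insert (0, 0) c.toString)
    (List.range (st.1 + 1)).map (fun ii =>
      (List.range (st.2.1 + 1)).map (fun jj => st.2.2.getD (ii, jj) " "))

-- ===== PORT B =====
-- B phase 1: split into segments; a space ends the segment and also consumes the next char.
def tokenizeAux (rest : List Char) (cur : List Char) (acc : List (List Char)) :
    List (List Char) :=
  match rest with
  | [] => acc ++ [cur]
  | c :: rs =>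
    if c = ' ' then tokenizeAux rs.tail [] (acc ++ [cur])
    else tokenizeAux rs (cur ++ [c]) acc
termination_by rest.length
decreasing_by all_goals simp [List.length_tail]

-- B phase 2: place one whole segment in the current direction (fold over its chars).
def placeSeg (seg : List Char) (horiz : Bool)
    (st : Nat × Nat × PySem.Dict (Nat × Nat) String) :
    Nat × Nat × PySem.Dict (Nat × Nat) String :=
  seg.foldl (fun st ch =>
    let i := if horiz then st.1 else st.1 + 1
    let j := if horiz then st.2.1 + 1 else st.2.1
    (i, j, st.2.2.insert (i, j) ch.toString)) st

-- B: 'for seg in segs[1:]: horiz = not horiz; place seg'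
def placeRest (segs : List (List Char)) (horiz : Bool)
    (st : Nat × Nat × PySem.Dict (Nat × Nat) String) :
    Nat × Nat × PySem.Dict (Nat × Nat) String :=
  match segs with
  | [] => st
  | seg :: ss => placeRest ss (!horiz) (placeSeg seg (!horiz) st)

def word_step_alt (s : String) : List (List String) :=
  match s.toList with
  | [] => []   -- unreachable under Pre_: Python raises IndexError on the empty string
  | c :: rest =>
    let segs := tokenizeAux rest [c] []
    let s0 := segs.headD []
    let st0 : Nat × Nat × PySem.Dict (Nat × Nat) String :=
      (0, 0, (PySem.Dict.empty).insert (0, 0) c.toString)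
    let st1 := placeSeg s0.tail true st0
    let st := placeRest segs.tail true st1
    (List.range (st.1 + 1)).map (fun ii =>
      (List.range (st.2.1 + 1)).map (fun jj => st.2.2.getD (ii, jj) " "))

-- ===== PRECONDITION & SPEC =====
-- Pre_ excludes only the empty string, on which A (s[0]) raises IndexError.
def Pre_word_step (s : String) : Prop := s ≠ ""
instance (s : String) : Decidable (Pre_word_step s) := by unfold Pre_word_step; infer_instance
def pvWitness_word_step : String := "ab cd e"

def Spec_word_step (s : String) (out : List (List String)) : Prop := out = word_step_alt s
instance (s : String) (out : List (List String)) : Decidable (Spec_word_step s out) := by unfold Spec_word_step; infer_instance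

-- ===== CLAIM (what is proved, stated in full; the proofs are below) =====
def Claim_equal_word_step : Prop := ∀ (s : String), Dom_word_step s → Pre_word_step s → Spec_word_step s (word_step s)

-- ===== LEMMAS AND PROOFS =====

-- placeCont: segment placement with the direction toggle AFTER each segment (A's shape)
def placeCont (segs : List (List Char)) (horiz : Bool)
    (st : Nat × Nat × PySem.Dict (Nat × Nat) String) :
    Nat × Nat × PySem.Dict (Nat × Nat) String :=
  match segs with
  | [] => st
  | seg :: ss => placeCont ss (!horiz) (placeSeg seg horiz st)

theorem placeRest_eq_placeCont (segs : List (List Char)) (horiz : Bool)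
    (st : Nat × Nat × PySem.Dict (Nat × Nat) String) :
    placeRest segs horiz st = placeCont segs (!horiz) st := by
  induction segs generalizing horiz st with
  | nil => rfl
  | cons seg ss ih => simp [placeRest, placeCont, ih]

theorem placeSeg_append (a b : List Char) (horiz : Bool)
    (st : Nat × Nat × PySem.Dict (Nat × Nat) String) :
    placeSeg (a ++ b) horiz st = placeSeg b horiz (placeSeg a horiz st) := by
  simp [placeSeg, List.foldl_append]

theorem tokenizeAux_acc (rest : List Char) (cur : List Char) (acc : List (List Char)) :
    tokenizeAux rest cur acc = acc ++ tokenizeAux rest cur [] := by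
  cases rest with
  | nil => simp [tokenizeAux]
  | cons c rs =>
    by_cases h : c = ' '
    · rw [tokenizeAux, if_pos h, tokenizeAux_acc rs.tail [] (acc ++ [cur])]
      conv_rhs => rw [tokenizeAux, if_pos h, tokenizeAux_acc rs.tail [] ([] ++ [cur])]
      simp
    · rw [tokenizeAux, if_neg h, tokenizeAux_acc rs (cur ++ [c]) acc]
      conv_rhs => rw [tokenizeAux, if_neg h, tokenizeAux_acc rs (cur ++ [c]) []]
      simp
termination_by rest.length
decreasing_by all_goals simp [List.length_tail]

theorem placeCont_tokenizeAux (rest cur : List Char) (horiz : Bool)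
    (st : Nat × Nat × PySem.Dict (Nat × Nat) String) :
    placeCont (tokenizeAux rest cur []) horiz st
      = placeCont (tokenizeAux rest [] []) horiz (placeSeg cur horiz st) := by
  cases rest with
  | nil => simp [tokenizeAux, placeCont, placeSeg]
  | cons c rs =>
    by_cases h : c = ' '
    · rw [tokenizeAux, if_pos h]
      simp only [List.nil_append]
      rw [tokenizeAux_acc rs.tail [] [cur]]
      conv_rhs => rw [tokenizeAux, if_pos h]
      simp only [List.nil_append]
      rw [tokenizeAux_acc rs.tail [] [[]]]
      simp [placeCont, placeSeg]
    · rw [tokenizeAux, if_neg h, placeCont_tokenizeAux rs (cur ++ [c]) horiz st]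
      conv_rhs => rw [tokenizeAux, if_neg h]
      simp only [List.nil_append]
      rw [placeCont_tokenizeAux rs [c] horiz (placeSeg cur horiz st), placeSeg_append]
termination_by rest.length
decreasing_by all_goals simp

theorem wordStepLoop_eq (rest : List Char) (i j : Nat) (flag : Bool)
    (m : PySem.Dict (Nat × Nat) String) :
    wordStepLoop rest i j flag m
      = placeCont (tokenizeAux rest [] []) flag (i, j, m) := by
  cases rest with
  | nil => simp [wordStepLoop, tokenizeAux, placeCont, placeSeg]
  | cons c rs =>
    by_cases h : c = ' '
    · rw [wordStepLoop, if_pos h, wordStepLoop_eq rs.tail i j (!flag) m]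
      conv_rhs => rw [tokenizeAux, if_pos h]
      simp only [List.nil_append]
      conv_rhs => rw [tokenizeAux_acc rs.tail [] [[]]]
      simp [placeCont, placeSeg]
    · rw [wordStepLoop, if_neg h]
      conv_rhs => rw [tokenizeAux, if_neg h]
      simp only [List.nil_append]
      rw [placeCont_tokenizeAux rs [c] flag (i, j, m), wordStepLoop_eq]
      congr 1
termination_by rest.length
decreasing_by all_goals simp [List.length_tail]

-- first segment of the tokenizer output carries cur as a prefix
theorem tokenizeAux_cur (rest cur : List Char) :
    tokenizeAux rest cur []
      = (cur ++ (tokenizeAux rest [] []).headD []) :: (tokenizeAux rest [] []).tail := by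
  cases rest with
  | nil => simp [tokenizeAux]
  | cons c rs =>
    by_cases h : c = ' '
    · rw [tokenizeAux, if_pos h]
      simp only [List.nil_append]
      rw [tokenizeAux_acc rs.tail [] [cur]]
      conv_rhs => rw [tokenizeAux, if_pos h]
      simp only [List.nil_append]
      rw [tokenizeAux_acc rs.tail [] [[]]]
      simp
    · rw [tokenizeAux, if_neg h, tokenizeAux_cur rs (cur ++ [c])]
      conv_rhs => rw [tokenizeAux, if_neg h]
      simp only [List.nil_append]
      conv_rhs => rw [tokenizeAux_cur rs [c]]
      simp
termination_by rest.length
decreasing_by all_goals simp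

-- ===== VERDICT (by name: the statement is the Claim_ definition above) =====
theorem word_step_spec : Claim_equal_word_step := by
  intro s _ hpre
  unfold Spec_word_step word_step word_step_alt
  cases hs : s.toList with
  | nil =>
    exact absurd (by
      have := congrArg String.ofList hs
      simpa using this) hpre
  | cons c rest =>
    simp only
    rw [wordStepLoop_eq, tokenizeAux_cur rest [c]]
    conv_lhs => rw [tokenizeAux_cur rest []]
    rw [placeRest_eq_placeCont]
    simp [placeCont]
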